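-- pv_equiv track=rewrite | github.com/zaknaj/trubuild-demo-temp | engine/tools/tech_rfp/tech_rfp_evaluation_criteria_extractor.py | _detect_scope_column
-- ===== SOURCE A (Python) =====
-- from typing import Any, Dict, List
--
-- _SCOPE_COL_CANDIDATES = (
--     "Evaluation Scope",
--     "evaluation_scope",
--     "scope",
--     "section",
--     "theme",
--     "Scope",
--     "Section",
--     "Theme",
--     "Category",
--     "category",
-- )
--
-- def _detect_scope_column(rows: List[Dict]) -> str | None:
--     if not rows:
--         return None
--     sample_lower = {k.lower().strip(): k for k in rows[0].keys()}
--     for candidate in _SCOPE_COL_CANDIDATES: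
--         actual = sample_lower.get(candidate.lower().strip())
--         if actual is not None:
--             return actual
--     return None
-- ===== SOURCE B (Python) =====
-- _SCOPE_COL_CANDIDATES = (
--     "Evaluation Scope",
--     "evaluation_scope",
--     "scope",
--     "section",
--     "theme",
--     "Scope",
--     "Section",
--     "Theme",
--     "Category",
--     "category",
-- )
--
-- def _detect_scope_column(rows):
--     # Key-major single pass: rank each header by the position of its lowered/stripped
--     # form in the candidate list and keep the best-ranked key (later keys win ties,
--     # which reproduces the dict's last-duplicate-wins behaviour).
--     if not rows:
--         return None
--     norms = [c.lower().strip() for c in _SCOPE_COL_CANDIDATES]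
--     best = None
--     best_rank = len(norms)
--     for k in rows[0].keys():
--         try:
--             r = norms.index(k.lower().strip())
--         except ValueError:
--             continue
--         if r <= best_rank:
--             best, best_rank = k, r
--     return best
-- ===== Notes on version B (the rewrite author's own statement) =====
-- stated objective: alternative
-- what changed: Inverted the traversal: instead of A's candidate-major search through a prebuilt lowered-key dict, B makes one key-major pass over the first row's headers, ranking each header by the position of its normalized form in the candidate list and keeping the best-ranked header (later keys win ties, matching the dict's last-duplicate-wins).
import Mathlib
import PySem

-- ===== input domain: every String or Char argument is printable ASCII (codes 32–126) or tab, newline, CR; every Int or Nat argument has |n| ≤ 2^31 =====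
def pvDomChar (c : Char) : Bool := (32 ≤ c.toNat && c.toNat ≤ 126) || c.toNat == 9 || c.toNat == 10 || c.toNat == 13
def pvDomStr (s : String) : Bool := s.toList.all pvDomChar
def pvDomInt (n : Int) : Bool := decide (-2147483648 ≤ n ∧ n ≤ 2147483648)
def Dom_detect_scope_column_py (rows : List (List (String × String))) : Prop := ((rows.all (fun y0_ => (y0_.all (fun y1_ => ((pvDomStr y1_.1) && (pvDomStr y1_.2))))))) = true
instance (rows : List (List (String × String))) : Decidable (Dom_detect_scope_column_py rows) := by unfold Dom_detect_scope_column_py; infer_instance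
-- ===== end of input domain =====

-- B replaces A's candidate-major dict lookup by one key-major ranking pass over the
-- first row's headers (alternative decomposition, same result); return value only.

-- normalisation used by both Pythons: k.lower().strip()
def pvNorm (k : String) : String := PySem.Str.strip (PySem.Str.lower k)

def pvCandidates : List String :=
  ["Evaluation Scope", "evaluation_scope", "scope", "section", "theme",
   "Scope", "Section", "Theme", "Category", "category"]

-- ===== PORT A =====
-- 'for candidate in _SCOPE_COL_CANDIDATES: actual = sample_lower.get(...); if actual is not None: return actual'
def pvLoopA (sample_lower : PySem.Dict String String) : List String → Option String
  | [] => none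
  | c :: cs =>
    match sample_lower.get? (pvNorm c) with
    | some actual => some actual
    | none => pvLoopA sample_lower cs

def detect_scope_column_py (rows : List (List (String × String))) : Option String :=
  match rows with
  | [] => none
  | row0 :: _ =>
    -- sample_lower = {k.lower().strip(): k for k in rows[0].keys()}
    let sample_lower :=
      (PySem.Dict.ofList row0).keys.foldl
        (fun d k => d.insert (pvNorm k) k) PySem.Dict.empty
    pvLoopA sample_lower pvCandidates

-- ===== PORT B =====
-- loop body: 'try: r = norms.index(k.lower().strip()) except ValueError: continue;
--             if r <= best_rank: best, best_rank = k, r'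
def pvStep (norms : List String) (st : Option String × Nat) (k : String) : Option String × Nat :=
  match PySem.List.index? norms (pvNorm k) with
  | some r => if r ≤ st.2 then (some k, r) else st
  | none => st

def detect_scope_column_py_alt (rows : List (List (String × String))) : Option String :=
  match rows with
  | [] => none
  | row0 :: _ =>
    let norms := pvCandidates.map pvNorm
    (((PySem.Dict.ofList row0).keys).foldl (pvStep norms) (none, norms.length)).1

-- ===== PRECONDITION & SPEC =====
def Spec_detect_scope_column_py (rows : List (List (String × String))) (out : Option String) : Prop := out = detect_scope_column_py_alt rows
instance (rows : List (List (String × String))) (out : Option String) : Decidable (Spec_detect_scope_column_py rows out) := by unfold Spec_detect_scope_column_py; infer_instance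

-- ===== CLAIM (what is proved, stated in full; the proofs are below) =====
def Claim_equal_detect_scope_column_py : Prop := ∀ (rows : List (List (String × String))), Dom_detect_scope_column_py rows → Spec_detect_scope_column_py rows (detect_scope_column_py rows)

-- ===== LEMMAS AND PROOFS =====

-- the dict built from keys maps a lowered name w to the LAST key normalising to w,
-- i.e. the first match in the reversed key list
theorem pv_get_eq_find (keys : List String) (w : String) :
    (keys.foldl (fun d k => d.insert (pvNorm k) k) PySem.Dict.empty).get? w
      = keys.reverse.find? (fun k => pvNorm k == w) := by
  induction keys using List.reverseRecOn with
  | nil => simp [PySem.Dict.get?, PySem.Dict.empty]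
  | append_singleton xs x ih =>
    rw [List.foldl_append, List.reverse_append]
    simp only [List.foldl_cons, List.foldl_nil, List.reverse_singleton, List.singleton_append,
      List.find?_cons]
    rw [PySem.Dict.get?_insert]
    by_cases h : pvNorm x = w
    · simp [h]
    · have hb : (pvNorm x == w) = false := by simp [h]
      simp [Ne.symm h, hb, ih]

-- A's candidate loop is findSome? over the candidates
theorem pv_loopA_findSome (d : PySem.Dict String String) (cs : List String) :
    pvLoopA d cs = cs.findSome? (fun c => d.get? (pvNorm c)) := by
  induction cs with
  | nil => rfl
  | cons c cs ih =>
    simp only [pvLoopA, List.findSome?_cons, ih]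
    cases d.get? (pvNorm c) <;> rfl

theorem pv_min_append_singleton (l : List Nat) (s : Nat) :
    (l ++ [s]).min? = some (match l.min? with | none => s | some m => min m s) := by
  induction l with
  | nil => rfl
  | cons a t ih =>
    rw [List.cons_append, List.min?_cons, List.min?_cons, ih]
    cases ht : t.min? with
    | none =>
      have ht' : t = [] := List.min?_eq_none_iff.mp ht
      subst ht'; simp
    | some m => simp [Nat.min_assoc]

-- characterisation of B's key-major fold: final state is the overall minimum rank
-- together with the LAST key achieving it
theorem pv_fold_char (cs keys : List String) :
    keys.foldl (pvStep cs) (none, cs.length)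
      = match (keys.filterMap (fun k => PySem.List.index? cs (pvNorm k))).min? with
        | none => (none, cs.length)
        | some m => (keys.reverse.find? (fun k => PySem.List.index? cs (pvNorm k) == some m), m) := by
  induction keys using List.reverseRecOn with
  | nil => rfl
  | append_singleton l x ih =>
    rw [List.foldl_append, List.foldl_cons, List.foldl_nil, ih, List.filterMap_append,
      List.reverse_append]
    simp only [List.filterMap_cons, List.filterMap_nil, List.reverse_singleton,
      List.singleton_append, List.find?_cons]
    cases hx : PySem.List.index? cs (pvNorm x) with
    | none =>
      simp only [List.append_nil]
      cases hm : (l.filterMap (fun k => PySem.List.index? cs (pvNorm k))).min? with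
      | none => simp only [pvStep, hx]
      | some m =>
        rw [PySem.List.index?_eq_idxOf?] at hx
        simp [pvStep, hx]
    | some s =>
      have hx2 := hx
      rw [PySem.List.index?_eq_idxOf?] at hx2
      have hslt : s < cs.length := by
        obtain ⟨hk, -, -⟩ := PySem.List.getElem_of_index?_eq_some hx
        exact hk
      rw [pv_min_append_singleton]
      cases hm : (l.filterMap (fun k => PySem.List.index? cs (pvNorm k))).min? with
      | none => simp [pvStep, hx2, Nat.le_of_lt hslt]
      | some m =>
        by_cases hsm : s ≤ m
        · have hmin : min m s = s := Nat.min_eq_right hsm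
          simp [pvStep, hx2, hsm]
        · have hms : m < s := Nat.lt_of_not_le hsm
          have hmin : min m s = m := Nat.min_eq_left (Nat.le_of_lt hms)
          have hne : (s == m) = false := by simp [hms.ne']
          simp [pvStep, hx2, hsm, hmin, hne]

-- the candidate-major findSome? equals the same minimum-rank characterisation
theorem pv_findSome_char (cs keys : List String) :
    cs.findSome? (fun n => keys.reverse.find? (fun k => pvNorm k == n))
      = match (keys.filterMap (fun k => PySem.List.index? cs (pvNorm k))).min? with
        | none => none
        | some m => keys.reverse.find? (fun k => PySem.List.index? cs (pvNorm k) == some m) := by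
  cases hm : (keys.filterMap (fun k => PySem.List.index? cs (pvNorm k))).min? with
  | none =>
    have hl : keys.filterMap (fun k => PySem.List.index? cs (pvNorm k)) = [] :=
      List.min?_eq_none_iff.mp hm
    apply List.findSome?_eq_none_iff.mpr
    intro n hn
    apply List.find?_eq_none.mpr
    intro k hk hpk
    have hkeys : k ∈ keys := List.mem_reverse.mp hk
    have hnk : pvNorm k = n := by simpa using hpk
    have hmem : pvNorm k ∈ cs := hnk ▸ hn
    have hsome : (PySem.List.index? cs (pvNorm k)).isSome :=
      (PySem.List.index?_isSome_iff cs (pvNorm k)).mpr hmem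
    obtain ⟨j, hj⟩ := Option.isSome_iff_exists.mp hsome
    have : j ∈ keys.filterMap (fun k => PySem.List.index? cs (pvNorm k)) :=
      List.mem_filterMap.mpr ⟨k, hkeys, hj⟩
    rw [hl] at this
    exact absurd this (List.not_mem_nil)
  | some m =>
    -- m is achieved by some key k0, and m is the minimum rank
    obtain ⟨hmmem, hminle⟩ := List.min?_eq_some_iff.mp hm
    obtain ⟨k0, hk0, hk0i⟩ := List.mem_filterMap.mp hmmem
    obtain ⟨hmlt, hcsm, hfirst⟩ := PySem.List.getElem_of_index?_eq_some hk0i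
    -- the two predicates agree on every string
    have hpred : (fun k => pvNorm k == cs[m]'hmlt)
        = (fun k => PySem.List.index? cs (pvNorm k) == some m) := by
      funext k
      by_cases h : pvNorm k = cs[m]'hmlt
      · have : PySem.List.index? cs (pvNorm k) = some m := by rw [h, hcsm]; exact hk0i
        rw [PySem.List.index?_eq_idxOf?] at this
        simp only [h, beq_self_eq_true]
        rw [← h]
        simp [this]
      · have : PySem.List.index? cs (pvNorm k) ≠ some m := by
          intro hc
          obtain ⟨hlt', hg, -⟩ := PySem.List.getElem_of_index?_eq_some hc
          exact h hg.symm
        rw [PySem.List.index?_eq_idxOf?] at this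
        simp [h, this]
    -- split cs at index m
    have hsplit : cs = cs.take m ++ cs[m]'hmlt :: cs.drop (m + 1) := by
      rw [← List.drop_eq_getElem_cons hmlt, List.take_append_drop]
    rw [hsplit, List.findSome?_append, List.findSome?_cons]
    -- every candidate before index m has no matching key
    have htake : (cs.take m).findSome?
        (fun n => keys.reverse.find? (fun k => pvNorm k == n)) = none := by
      apply List.findSome?_eq_none_iff.mpr
      intro n hn
      apply List.find?_eq_none.mpr
      intro k hk hpk
      obtain ⟨i, hilt, hig⟩ := List.getElem_of_mem hn
      rw [List.length_take] at hilt
      have him : i < m := lt_of_lt_of_le hilt (min_le_left _ _)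
      have hicslt : i < cs.length := lt_of_lt_of_le hilt (min_le_right _ _)
      have hcsi : cs[i]'hicslt = n := by rw [← hig, List.getElem_take]
      have hkeys : k ∈ keys := List.mem_reverse.mp hk
      have hnk : pvNorm k = n := by simpa using hpk
      have hmem : pvNorm k ∈ cs := by
        rw [hnk, ← hcsi]; exact List.getElem_mem _
      obtain ⟨j, hj⟩ := Option.isSome_iff_exists.mp ((PySem.List.index?_isSome_iff cs (pvNorm k)).mpr hmem)
      have hjm : m ≤ j := hminle j (List.mem_filterMap.mpr ⟨k, hkeys, hj⟩)
      obtain ⟨hjlt, -, hjfirst⟩ := PySem.List.getElem_of_index?_eq_some hj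
      have hij : i < j := lt_of_lt_of_le him hjm
      exact hjfirst i hij (by rw [hcsi, hnk])
    rw [htake]
    -- the candidate at index m matches k0, so find? returns a value
    have hfind : (keys.reverse.find? (fun k => pvNorm k == cs[m]'hmlt)).isSome := by
      apply List.find?_isSome.mpr
      exact ⟨k0, List.mem_reverse.mpr hk0, by simp [hcsm]⟩
    obtain ⟨w, hw⟩ := Option.isSome_iff_exists.mp hfind
    rw [hw]
    rw [hpred] at hw
    simpa using hw.symm

-- ===== VERDICT (by name: the statement is the Claim_ definition above) =====
theorem detect_scope_column_py_spec : Claim_equal_detect_scope_column_py := by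
  intro rows _
  unfold Spec_detect_scope_column_py detect_scope_column_py detect_scope_column_py_alt
  cases rows with
  | nil => rfl
  | cons row0 _ =>
    simp only
    rw [pv_loopA_findSome]
    simp only [pv_get_eq_find]
    have h := pv_findSome_char (pvCandidates.map pvNorm) (PySem.Dict.ofList row0).keys
    rw [List.findSome?_map] at h
    simp only [Function.comp_def] at h
    rw [h, pv_fold_char]
    cases hm : (((PySem.Dict.ofList row0).keys).filterMap
        (fun k => PySem.List.index? (pvCandidates.map pvNorm) (pvNorm k))).min? with
    | none => simp
    | some m => simp
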